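-- pv_equiv track=rewrite | github.com/shiranon/study_python | code/improve_practical_python_algorithms/ch2/prime_game.py | get_prime_game
-- ===== SOURCE A (Python) =====
-- def is_prime(num):
--     if num < 2:
--         return False
--     for i in range(2, num):
--         if num % i == 0:
--             return False
--     return True
--
-- def get_prime_game(max_value):
--     res = ""
--     for n in range(1, max_value + 1):
--         # 素数ならPを、素数でなければ数値を返す
--         if is_prime(n):
--             v = "P"
--         else:
--             v = n
--         res += "{:>4}".format(v)
--
--         # 値をカンマで縊り10個ずつ改行を出力(1から数えて10)
--         if (n - 1) % 10 == 9:
--             res += "\n"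
--         else:
--             res += ","
--     return res
-- ===== SOURCE B (Python) =====
-- def get_prime_game(max_value):
--     def is_prime_fast(num):
--         if num < 2:
--             return False
--         i = 2
--         while i * i <= num:
--             if num % i == 0:
--                 return False
--             i += 1
--         return True
--
--     parts = []
--     for n in range(1, max_value + 1):
--         cell = "P" if is_prime_fast(n) else str(n)
--         parts.append(cell.rjust(4))
--         parts.append("\n" if n % 10 == 0 else ",")
--     return "".join(parts)
-- ===== Notes on version B (the rewrite author's own statement) =====
-- stated objective: faster
-- what changed: primality by trial division only up to sqrt(n) instead of all i < n, and the result assembled by joining a list of cells instead of repeated string concatenation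
import Mathlib
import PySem

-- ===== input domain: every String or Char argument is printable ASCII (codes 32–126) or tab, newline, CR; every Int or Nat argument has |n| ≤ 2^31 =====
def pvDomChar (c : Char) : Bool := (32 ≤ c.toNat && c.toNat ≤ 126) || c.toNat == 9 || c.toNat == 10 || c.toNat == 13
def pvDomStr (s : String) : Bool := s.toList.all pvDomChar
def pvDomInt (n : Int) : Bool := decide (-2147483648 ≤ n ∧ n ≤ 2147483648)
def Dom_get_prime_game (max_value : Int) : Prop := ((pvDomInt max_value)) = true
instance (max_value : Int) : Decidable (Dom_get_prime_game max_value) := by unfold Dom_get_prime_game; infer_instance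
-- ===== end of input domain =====

-- B replaces A's per-number trial division over all i < n with trial division only while i*i <= n,
-- and assembles the output by joining a list of cells instead of repeated string concatenation (objective: faster).

-- '"{:>4}".format(v)' in A / 'cell.rjust(4)' in B: right-justify to width 4 with spaces
-- (exact for these arguments: "P" or a decimal string; no fill/sign options are involved).
def pvPad4 (cs : List Char) : List Char := List.replicate (4 - cs.length) ' ' ++ cs

-- ===== PORT A =====
def pvIsPrime (num : Int) : Bool :=
  if num < 2 then false
  else (PySem.List.pyRange 2 num 1).all (fun i => !(PySem.Int.mod num i == 0))

def get_prime_game (max_value : Int) : String :=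
  String.ofList <|
    (PySem.List.pyRange 1 (max_value + 1) 1).foldl (fun res n =>
      let v := if pvIsPrime n then ['P'] else PySem.Int.toChars n
      let res := res ++ pvPad4 v
      if PySem.Int.mod (n - 1) 10 == 9 then res ++ ['\n'] else res ++ [',']) []

-- ===== PORT B =====
-- the 'while i * i <= num' loop of Source B's is_prime_fast
def pvTrial (num i : Int) : Bool :=
  if _h : i * i ≤ num then
    if PySem.Int.mod num i == 0 then false else pvTrial num (i + 1)
  else true
termination_by (num + 1 - i).toNat
decreasing_by
  have hi : i ≤ i * i := by nlinarith [sq_nonneg (i - 1)]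
  omega

def pvIsPrimeFast (num : Int) : Bool :=
  if num < 2 then false else pvTrial num 2

-- parts accumulated as a list of cells (cell, then separator), joined with "" at the end
def get_prime_game_alt (max_value : Int) : String :=
  String.ofList
    (((PySem.List.pyRange 1 (max_value + 1) 1).foldl (fun parts n =>
      (parts ++ [pvPad4 (if pvIsPrimeFast n then ['P'] else PySem.Int.toChars n)]) ++
        [if PySem.Int.mod n 10 == 0 then ['\n'] else [',']]) []).flatten)

-- ===== PRECONDITION & SPEC =====
def Spec_get_prime_game (max_value : Int) (out : String) : Prop := out = get_prime_game_alt max_value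
instance (max_value : Int) (out : String) : Decidable (Spec_get_prime_game max_value out) := by unfold Spec_get_prime_game; infer_instance

-- ===== CLAIM (what is proved, stated in full; the proofs are below) =====
def Claim_equal_get_prime_game : Prop := ∀ (max_value : Int), Dom_get_prime_game max_value → Spec_get_prime_game max_value (get_prime_game max_value)

-- ===== LEMMAS AND PROOFS =====

-- pvTrial num i is true iff no j ≥ i with j*j ≤ num divides num (for 0 ≤ i)
theorem pvTrial_iff (num : Int) (i : Int) (hi : 0 ≤ i) :
    pvTrial num i = true ↔ ∀ j : Int, i ≤ j → j * j ≤ num → ¬ (j ∣ num) := by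
  induction i using pvTrial.induct num with
  | case1 x hx hm =>
    rw [pvTrial, dif_pos hx, if_pos hm]
    simp only [Bool.false_eq_true, false_iff, not_forall]
    exact ⟨x, le_refl x, hx, by
      rw [beq_iff_eq, PySem.Int.mod_eq_zero_iff_dvd] at hm
      simp [hm]⟩
  | case2 x hx hm ih =>
    rw [pvTrial, dif_pos hx, if_neg hm]
    rw [ih (by omega)]
    constructor
    · intro h j hj hjj
      rcases eq_or_lt_of_le hj with rfl | hlt
      · rw [beq_iff_eq, PySem.Int.mod_eq_zero_iff_dvd] at hm; exact fun hd => hm hd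
      · exact h j (by omega) hjj
    · intro h j hj hjj; exact h j (by omega) hjj
  | case3 x hx =>
    rw [pvTrial, dif_neg hx]
    simp only [true_iff]
    intro j hj hjj hd
    exact hx (le_trans (by nlinarith) hjj)

-- a proper divisor exists iff one with square ≤ num exists; hence the two tests agree
theorem prime_eq (num : Int) : pvIsPrime num = pvIsPrimeFast num := by
  unfold pvIsPrime pvIsPrimeFast
  by_cases h : num < 2
  · simp [h]
  · rw [if_neg h, if_neg h]
    have h2 : 2 ≤ num := by omega
    rw [Bool.eq_iff_iff, List.all_eq_true, pvTrial_iff num 2 (by norm_num)]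
    constructor
    · intro hA j hj hjj hd
      have hjn : j < num := by nlinarith
      have := hA j (by rw [PySem.List.mem_pyRange_one]; exact ⟨hj, hjn⟩)
      rw [Bool.not_eq_eq_eq_not, Bool.not_true, beq_eq_false_iff_ne] at this
      exact this (by rwa [PySem.Int.mod_eq_zero_iff_dvd])
    · intro hB i hiMem
      rw [PySem.List.mem_pyRange_one] at hiMem
      obtain ⟨hi2, hin⟩ := hiMem
      rw [Bool.not_eq_eq_eq_not, Bool.not_true, beq_eq_false_iff_ne]
      intro hm
      rw [PySem.Int.mod_eq_zero_iff_dvd] at hm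
      obtain ⟨q, hq⟩ := hm
      have hq2 : 2 ≤ q := by nlinarith
      by_cases hii : i * i ≤ num
      · exact hB i hi2 hii ⟨q, hq⟩
      · exact hB q hq2 (by nlinarith) ⟨i, by linarith [hq, mul_comm i q]⟩

-- '(n - 1) % 10 == 9' is 'n % 10 == 0'
theorem sep_eq (n : Int) :
    (PySem.Int.mod (n - 1) 10 == 9) = (PySem.Int.mod n 10 == 0) := by
  have h1 := PySem.Int.mod_eq_emod_of_pos (a := n - 1) (b := 10) (by norm_num)
  have h2 := PySem.Int.mod_eq_emod_of_pos (a := n) (b := 10) (by norm_num)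
  rw [h1, h2, Bool.eq_iff_iff, beq_iff_eq, beq_iff_eq]
  omega

-- A's accumulation loop as a flatMap
theorem foldlA {α : Type} (p : α → Bool) (f : α → List Char) (c1 c2 : Char)
    (l : List α) (acc : List Char) :
    l.foldl (fun res n => if p n then (res ++ f n) ++ [c1] else (res ++ f n) ++ [c2]) acc
      = acc ++ l.flatMap (fun n => f n ++ [if p n then c1 else c2]) := by
  induction l generalizing acc with
  | nil => simp
  | cons x xs ih =>
    simp only [List.foldl_cons, List.flatMap_cons]
    rw [ih]
    by_cases h : p x <;> simp [h, List.append_assoc]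

-- B's parts-then-join as a flatMap
theorem foldlB {α : Type} (f g : α → List Char) (l : List α) (acc : List (List Char)) :
    (l.foldl (fun parts n => (parts ++ [f n]) ++ [g n]) acc).flatten
      = acc.flatten ++ l.flatMap (fun n => f n ++ g n) := by
  induction l generalizing acc with
  | nil => simp
  | cons x xs ih =>
    simp only [List.foldl_cons, List.flatMap_cons]
    rw [ih]
    simp [List.append_assoc]

theorem main_eq (max_value : Int) : get_prime_game max_value = get_prime_game_alt max_value := by
  unfold get_prime_game get_prime_game_alt
  simp only []
  rw [foldlA (fun n => PySem.Int.mod (n - 1) 10 == 9)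
        (fun n => pvPad4 (if pvIsPrime n then ['P'] else PySem.Int.toChars n)) '\n' ','
        (PySem.List.pyRange 1 (max_value + 1) 1) [],
      foldlB (fun n => pvPad4 (if pvIsPrimeFast n then ['P'] else PySem.Int.toChars n))
        (fun n => if PySem.Int.mod n 10 == 0 then ['\n'] else [','])
        (PySem.List.pyRange 1 (max_value + 1) 1) []]
  simp only [List.nil_append, List.flatten_nil]
  congr 1
  congr 1
  funext n
  rw [prime_eq, sep_eq]
  by_cases h : (10:Int) ∣ n <;> simp [h]

-- ===== VERDICT (by name: the statement is the Claim_ definition above) =====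
theorem get_prime_game_spec : Claim_equal_get_prime_game := by
  intro max_value _
  unfold Spec_get_prime_game
  exact main_eq max_value
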